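-- pv_equiv track=rewrite | github.com/iklymchuk/test-report-analyzer | analysis/flaky_detector.py | _detect_transitions
-- ===== SOURCE A (Python) =====
-- from typing import List, Dict, Optional
--
-- def _detect_transitions(statuses: List[str]) -> bool:
--     """
--     Detect if there are any status transitions in the sequence.
--
--     A transition is when a test changes from passed to failed/error or vice versa.
--     """
--     for i in range(len(statuses) - 1):
--         current = statuses[i]
--         next_status = statuses[i + 1]
--
--         # Check for meaningful transitions (not involving skipped)
--         if current == 'passed' and next_status in ['failed', 'error']:
--             return True
--         if current in ['failed', 'error'] and next_status == 'passed':
--             return True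
--
--     return False
-- ===== SOURCE B (Python) =====
-- def _detect_transitions(statuses):
--     # Encode each status as one marker char, then look for a transition pattern.
--     encoded = ''.join(
--         'P' if s == 'passed' else 'F' if s in ('failed', 'error') else 'O'
--         for s in statuses)
--     return 'PF' in encoded or 'FP' in encoded
-- ===== Notes on version B (the rewrite author's own statement) =====
-- stated objective: idiomatic
-- what changed: B maps every status to a one-character marker (P/F/O), joins them into a string, and answers with two substring searches ('PF'/'FP') instead of A's index loop comparing adjacent pairs against status literals.
import Mathlib
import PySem

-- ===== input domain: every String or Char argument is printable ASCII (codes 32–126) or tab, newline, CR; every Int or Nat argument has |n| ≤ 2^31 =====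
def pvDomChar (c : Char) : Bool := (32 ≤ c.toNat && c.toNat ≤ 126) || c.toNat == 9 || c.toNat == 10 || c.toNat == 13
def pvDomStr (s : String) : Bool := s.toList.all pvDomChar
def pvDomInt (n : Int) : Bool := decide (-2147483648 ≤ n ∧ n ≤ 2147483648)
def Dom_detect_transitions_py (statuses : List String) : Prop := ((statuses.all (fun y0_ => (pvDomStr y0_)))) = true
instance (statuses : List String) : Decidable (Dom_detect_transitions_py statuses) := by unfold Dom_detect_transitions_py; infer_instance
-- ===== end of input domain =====

-- B encodes each status as a one-character marker (P/F/O) and detects a transition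
-- by substring search for "PF"/"FP" instead of A's adjacent-pair index loop (idiomatic).


-- ===== PORT A =====
-- A's loop over i in range(len-1) reading statuses[i], statuses[i+1] is the obvious
-- structural recursion over adjacent pairs; branches in the loop's order.
def detect_transitions_py : List String → Bool
  | current :: next_status :: rest =>
    if current == "passed" && (next_status == "failed" || next_status == "error") then
      true
    else if (current == "failed" || current == "error") && next_status == "passed" then
      true
    else
      detect_transitions_py (next_status :: rest)
  | _ => false

-- ===== PORT B =====
def pvMark (s : String) : String :=
  if s == "passed" then "P" else if s == "failed" || s == "error" then "F" else "O"

def detect_transitions_py_alt (statuses : List String) : Bool :=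
  let encoded := PySem.Str.join "" (statuses.map pvMark)
  PySem.Str.isIn "PF" encoded || PySem.Str.isIn "FP" encoded

-- ===== PRECONDITION & SPEC =====
def Spec_detect_transitions_py (statuses : List String) (out : Bool) : Prop := out = detect_transitions_py_alt statuses
instance (statuses : List String) (out : Bool) : Decidable (Spec_detect_transitions_py statuses out) := by unfold Spec_detect_transitions_py; infer_instance

-- ===== CLAIM (what is proved, stated in full; the proofs are below) =====
def Claim_equal_detect_transitions_py : Prop := ∀ (statuses : List String), Dom_detect_transitions_py statuses → Spec_detect_transitions_py statuses (detect_transitions_py statuses)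

-- ===== LEMMAS AND PROOFS =====

/-- Character-level marker corresponding to `pvMark`. -/
def pvMarkc (s : String) : Char :=
  if s == "passed" then 'P' else if s == "failed" || s == "error" then 'F' else 'O'

theorem pvMark_toList (s : String) : (pvMark s).toList = [pvMarkc s] := by
  unfold pvMark pvMarkc; split_ifs <;> rfl

/-- B's port, at the level of the encoded character list. -/
theorem alt_eq_chars (xs : List String) :
    detect_transitions_py_alt xs =
      (PySem.Chars.isIn ['P', 'F'] (xs.map pvMarkc) ||
       PySem.Chars.isIn ['F', 'P'] (xs.map pvMarkc)) := by
  have hjoin : (PySem.Str.join "" (xs.map pvMark)).toList = xs.map pvMarkc := by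
    rw [PySem.Str.toList_join]
    have : (xs.map pvMark).map String.toList = (xs.map pvMarkc).map (fun c => [c]) := by
      simp [List.map_map, Function.comp, pvMark_toList]
    rw [this]
    simpa using PySem.Chars.join_nil_singletons (xs.map pvMarkc)
  simp [detect_transitions_py_alt, PySem.Str.isIn_eq, hjoin]

theorem pair_infix_cons_cons (a b c d : Char) (rest : List Char) :
    [a, b] <:+: c :: d :: rest ↔ (a = c ∧ b = d) ∨ [a, b] <:+: d :: rest := by
  rw [List.infix_cons_iff]
  constructor
  · rintro (h | h)
    · rcases h with ⟨t, ht⟩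
      simp at ht
      exact Or.inl ⟨ht.1, ht.2.1⟩
    · exact Or.inr h
  · rintro (⟨rfl, rfl⟩ | h)
    · exact Or.inl ⟨rest, rfl⟩
    · exact Or.inr h

theorem pair_not_infix_short (a b c : Char) :
    ¬ [a, b] <:+: [c] ∧ ¬ [a, b] <:+: ([] : List Char) := by
  constructor
  · intro h
    have := h.length_le
    simp at this
  · intro h
    have := h.length_le
    simp at this

theorem pvMarkc_eq_P_iff (s : String) : pvMarkc s = 'P' ↔ s = "passed" := by
  unfold pvMarkc
  split_ifs with h1 h2 <;> simp_all

theorem pvMarkc_eq_F_iff (s : String) : pvMarkc s = 'F' ↔ (s = "failed" ∨ s = "error") := by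
  unfold pvMarkc
  split_ifs with h1 h2 <;> simp_all

/-- Main bridge: A's pairwise loop equals the char-level substring condition. -/
theorem a_eq_chars (xs : List String) :
    detect_transitions_py xs =
      (decide (['P', 'F'] <:+: xs.map pvMarkc) ||
       decide (['F', 'P'] <:+: xs.map pvMarkc)) := by
  induction xs with
  | nil =>
    simp [detect_transitions_py, (pair_not_infix_short 'P' 'F' 'x').2,
      (pair_not_infix_short 'F' 'P' 'x').2]
  | cons x tl ih =>
    cases tl with
    | nil =>
      simp [detect_transitions_py, (pair_not_infix_short 'P' 'F' (pvMarkc x)).1,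
        (pair_not_infix_short 'F' 'P' (pvMarkc x)).1]
    | cons y rest =>
      rw [detect_transitions_py, ih]
      simp only [List.map_cons]
      rw [decide_eq_decide.mpr (pair_infix_cons_cons 'P' 'F' (pvMarkc x) (pvMarkc y) (rest.map pvMarkc)),
        decide_eq_decide.mpr (pair_infix_cons_cons 'F' 'P' (pvMarkc x) (pvMarkc y) (rest.map pvMarkc))]
      simp only [Bool.decide_or, Bool.decide_and]
      have hP : ∀ s : String, decide ('P' = pvMarkc s) = (s == "passed") := by
        intro s; simp [eq_comm, pvMarkc_eq_P_iff, beq_eq_decide]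
      have hF : ∀ s : String, decide ('F' = pvMarkc s) = (s == "failed" || s == "error") := by
        intro s; simp [eq_comm, pvMarkc_eq_F_iff, Bool.decide_or, beq_eq_decide]
      rw [hP, hF, hF, hP]
      cases hA : (x == "passed" && (y == "failed" || y == "error")) <;>
        cases hB : ((x == "failed" || x == "error") && y == "passed") <;>
        first
          | rfl
          | simp
      all_goals infer_instance

-- ===== VERDICT (by name: the statement is the Claim_ definition above) =====
theorem detect_transitions_py_spec : Claim_equal_detect_transitions_py := by
  intro xs _
  show detect_transitions_py xs = detect_transitions_py_alt xs
  rw [alt_eq_chars, a_eq_chars]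
  have h1 : PySem.Chars.isIn ['P','F'] (xs.map pvMarkc) = decide (['P','F'] <:+: xs.map pvMarkc) := by
    by_cases h : ['P','F'] <:+: xs.map pvMarkc
    · simp [h, (PySem.Chars.isIn_iff_infix _ _).mpr h]
    · simp [h, (PySem.Chars.isIn_eq_false_iff _ _).mpr h]
  have h2 : PySem.Chars.isIn ['F','P'] (xs.map pvMarkc) = decide (['F','P'] <:+: xs.map pvMarkc) := by
    by_cases h : ['F','P'] <:+: xs.map pvMarkc
    · simp [h, (PySem.Chars.isIn_iff_infix _ _).mpr h]
    · simp [h, (PySem.Chars.isIn_eq_false_iff _ _).mpr h]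
  rw [h1, h2]
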